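-- pv_equiv track=rewrite | github.com/RabbitCrab/MultiLingual-OCR | yolov5/boundingBoxMerge.py | remove_short_in_long
-- ===== SOURCE A (Python) =====
-- def remove_short_in_long(sorted_len_list):
--     id1 = 0
--     while id1 < len(sorted_len_list):
--         id2 = id1 + 1
--         while id2 < len(sorted_len_list):
--             del_flag = 0
--             for ele in sorted_len_list[id2]:
--                 if ele in sorted_len_list[id1]:
--                     del sorted_len_list[id2]
--                     del_flag = 1
--                     break
--             if not del_flag:
--                 id2 += 1
--         id1 += 1
--
--     return sorted_len_list
-- ===== SOURCE B (Python) =====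
-- def remove_short_in_long(sorted_len_list):
--     seen = set()
--     kept = []
--     for lst in sorted_len_list:
--         if seen.isdisjoint(lst):
--             kept.append(lst)
--             seen.update(lst)
--     sorted_len_list[:] = kept
--     return sorted_len_list
-- ===== Notes on version B (the rewrite author's own statement) =====
-- stated objective: faster
-- what changed: Replaced the nested while-loops that repeatedly rescan and delete from the list in place with a single pass that keeps a running set of all elements of kept lists and keeps a list iff it is disjoint from that set.
import Mathlib
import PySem

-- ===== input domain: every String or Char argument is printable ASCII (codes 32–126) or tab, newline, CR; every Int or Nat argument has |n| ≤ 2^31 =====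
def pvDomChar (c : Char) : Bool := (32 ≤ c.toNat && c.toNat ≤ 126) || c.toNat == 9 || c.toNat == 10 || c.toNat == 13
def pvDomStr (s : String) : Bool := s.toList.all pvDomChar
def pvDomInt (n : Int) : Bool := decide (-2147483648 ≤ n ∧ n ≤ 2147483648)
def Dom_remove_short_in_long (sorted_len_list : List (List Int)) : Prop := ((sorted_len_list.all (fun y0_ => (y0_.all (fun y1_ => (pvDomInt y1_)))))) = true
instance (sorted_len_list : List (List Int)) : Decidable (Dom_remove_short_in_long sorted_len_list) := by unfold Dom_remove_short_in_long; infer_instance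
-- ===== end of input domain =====

-- B replaces A's quadratic rescan-and-delete with one pass over the list keeping a
-- running set of all kept elements (objective: faster). A mutates its argument in
-- place (B performs the same net mutation via slice assignment); the equivalence
-- proved here is about the RETURN value.

-- ===== PORT A =====
-- 'ele in sorted_len_list[id1]' for some ele of sorted_len_list[id2] (the for/break loop of A)
def pvShares (xs ys : List Int) : Bool := xs.any (fun e => ys.contains e)

-- inner 'while id2 < len(...)' loop of A: delete index id2 or advance id2
-- (structural recursion on a fuel bound; fuel l.length + 1 always suffices, proved in pvInnerA_eq)
def pvInnerA (fuel : Nat) (l : List (List Int)) (id1 id2 : Nat) : List (List Int) :=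
  match fuel with
  | 0 => l
  | fuel + 1 =>
    if id2 < l.length then
      if pvShares (l.getD id2 []) (l.getD id1 []) then pvInnerA fuel (l.eraseIdx id2) id1 id2
      else pvInnerA fuel l id1 (id2 + 1)
    else l

-- outer 'while id1 < len(...)' loop of A
def pvOuterA (fuel : Nat) (l : List (List Int)) (id1 : Nat) : List (List Int) :=
  match fuel with
  | 0 => l
  | fuel + 1 =>
    if id1 < l.length then pvOuterA fuel (pvInnerA (l.length + 1) l id1 (id1 + 1)) (id1 + 1)
    else l

def remove_short_in_long (sorted_len_list : List (List Int)) : List (List Int) :=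
  pvOuterA (sorted_len_list.length + 1) sorted_len_list 0

-- ===== PORT B =====
def remove_short_in_long_alt (sorted_len_list : List (List Int)) : List (List Int) :=
  (sorted_len_list.foldl
    (fun (acc : List (List Int) × PySem.Set Int) lst =>
      if PySem.Set.isdisjoint acc.2 lst then (acc.1 ++ [lst], PySem.Set.update acc.2 lst)
      else acc)
    (([] : List (List Int)), (PySem.Set.empty : PySem.Set Int))).1

-- ===== PRECONDITION & SPEC =====
def Spec_remove_short_in_long (sorted_len_list : List (List Int)) (out : List (List Int)) : Prop := out = remove_short_in_long_alt sorted_len_list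
instance (sorted_len_list : List (List Int)) (out : List (List Int)) : Decidable (Spec_remove_short_in_long sorted_len_list out) := by unfold Spec_remove_short_in_long; infer_instance

-- ===== CLAIM (what is proved, stated in full; the proofs are below) =====
def Claim_equal_remove_short_in_long : Prop := ∀ (sorted_len_list : List (List Int)), Dom_remove_short_in_long sorted_len_list → Spec_remove_short_in_long sorted_len_list (remove_short_in_long sorted_len_list)

-- ===== LEMMAS AND PROOFS =====

-- the common greedy specification: keep the head, filter out later lists sharing an element with it
def pvG (l : List (List Int)) : List (List Int) :=
  match l with
  | [] => []
  | x :: xs => x :: pvG (xs.filter (fun y => !pvShares y x))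
termination_by l.length
decreasing_by
  simp
  exact le_trans (List.length_filter_le _ _) (le_of_eq List.length_attach)

theorem pvShares_comm (a b : List Int) : pvShares a b = pvShares b a := by
  rw [Bool.eq_iff_iff]
  simp only [pvShares, List.any_eq_true, List.contains_iff_mem]
  tauto

theorem pvInnerA_eq (fuel : Nat) (l : List (List Int)) (id1 id2 : Nat)
    (hf : l.length - id2 < fuel) (h12 : id1 < id2) :
    pvInnerA fuel l id1 id2 =
      l.take id2 ++ (l.drop id2).filter (fun y => !pvShares y (l.getD id1 [])) := by
  induction fuel generalizing l id2 with
  | zero => omega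
  | succ fuel ih =>
      rw [pvInnerA]
      by_cases h : id2 < l.length
      · rw [if_pos h]
        have hlen : (l.take id2).length = id2 := by
          simp [List.length_take, Nat.min_eq_left (Nat.le_of_lt h)]
        have hc : l.drop id2 = l.getD id2 [] :: l.drop (id2 + 1) := by
          rw [List.getD_eq_getElem?_getD, List.getElem?_eq_getElem h]
          simpa using List.drop_eq_getElem_cons h
        by_cases hs : pvShares (l.getD id2 []) (l.getD id1 []) = true
        · rw [if_pos hs]
          have htd : l.eraseIdx id2 = l.take id2 ++ l.drop (id2 + 1) :=
            List.eraseIdx_eq_take_drop_succ l id2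
          have hget : (l.eraseIdx id2).getD id1 [] = l.getD id1 [] := by
            rw [List.getD_eq_getElem?_getD, List.getD_eq_getElem?_getD,
              List.getElem?_eraseIdx_of_lt (by omega)]
          have htake : (l.eraseIdx id2).take id2 = l.take id2 := by
            rw [htd]; exact List.take_left' hlen
          have hdrop : (l.eraseIdx id2).drop id2 = l.drop (id2 + 1) := by
            rw [htd]; exact List.drop_left' hlen
          have hel : (l.eraseIdx id2).length = l.length - 1 := List.length_eraseIdx_of_lt h
          rw [ih _ _ (by omega) h12, hget, htake, hdrop, hc, List.filter_cons, hs]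
          simp
        · rw [if_neg hs]
          have hs' : pvShares (l.getD id2 []) (l.getD id1 []) = false := eq_false_of_ne_true hs
          have ht : l.take (id2 + 1) = l.take id2 ++ [l.getD id2 []] := by
            rw [List.getD_eq_getElem?_getD, List.getElem?_eq_getElem h]
            simp [List.take_add_one (l := l) (i := id2)]
          rw [ih _ _ (by omega) (by omega), hc, List.filter_cons, hs', ht]
          simp
      · rw [if_neg h, List.take_of_length_le (by omega), List.drop_of_length_le (by omega)]
        simp

theorem pvOuterA_eq (fuel : Nat) (l : List (List Int)) (id1 : Nat)
    (hf : l.length - id1 < fuel) :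
    pvOuterA fuel l id1 = l.take id1 ++ pvG (l.drop id1) := by
  induction fuel generalizing l id1 with
  | zero => omega
  | succ fuel ih =>
      rw [pvOuterA]
      by_cases h : id1 < l.length
      · rw [if_pos h]
        have hin : pvInnerA (l.length + 1) l id1 (id1 + 1) =
            l.take (id1 + 1) ++ (l.drop (id1 + 1)).filter (fun y => !pvShares y (l.getD id1 [])) :=
          pvInnerA_eq _ l id1 (id1 + 1) (by omega) (by omega)
        have hlen : (l.take (id1 + 1)).length = id1 + 1 := by
          simp [List.length_take, Nat.min_eq_left (by omega : id1 + 1 ≤ l.length)]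
        have hfl : ((l.drop (id1 + 1)).filter (fun y => !pvShares y (l.getD id1 []))).length ≤
            l.length - (id1 + 1) := by
          refine le_trans (List.length_filter_le _ _) ?_
          simp [List.length_drop]
        have hlen' : (pvInnerA (l.length + 1) l id1 (id1 + 1)).length ≤ l.length := by
          rw [hin]; simp only [List.length_append, hlen]; omega
        rw [ih _ _ (by omega), hin, List.take_left' hlen, List.drop_left' hlen]
        have hc : l.drop id1 = l.getD id1 [] :: l.drop (id1 + 1) := by
          rw [List.getD_eq_getElem?_getD, List.getElem?_eq_getElem h]
          simpa using List.drop_eq_getElem_cons h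
        have ht : l.take (id1 + 1) = l.take id1 ++ [l.getD id1 []] := by
          rw [List.getD_eq_getElem?_getD, List.getElem?_eq_getElem h]
          simp [List.take_add_one (l := l) (i := id1)]
        rw [hc, ht, pvG.eq_2]
        simp
      · rw [if_neg h, List.take_of_length_le (by omega), List.drop_of_length_le (by omega)]
        simp [pvG.eq_1]

-- greedy with an explicit running set (the shape of B's fold)
def pvGS (seen : PySem.Set Int) : List (List Int) → List (List Int)
  | [] => []
  | x :: xs =>
      if PySem.Set.isdisjoint seen x then x :: pvGS (PySem.Set.update seen x) xs
      else pvGS seen xs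

theorem pvFoldl_eq (xs : List (List Int)) (kept : List (List Int)) (seen : PySem.Set Int) :
    (xs.foldl
      (fun (acc : List (List Int) × PySem.Set Int) lst =>
        if PySem.Set.isdisjoint acc.2 lst then (acc.1 ++ [lst], PySem.Set.update acc.2 lst)
        else acc)
      (kept, seen)).1 = kept ++ pvGS seen xs := by
  induction xs generalizing kept seen with
  | nil => simp [pvGS]
  | cons x xs ih =>
      simp only [List.foldl_cons, pvGS]
      by_cases h : PySem.Set.isdisjoint seen x
      · rw [if_pos h, if_pos h, ih]; simp
      · rw [if_neg h, if_neg h, ih]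

theorem pvIsdisjoint_eq (seen : PySem.Set Int) (x : List Int) :
    PySem.Set.isdisjoint seen x = !pvShares x seen := by
  rw [PySem.Set.isdisjoint, ← pvShares_comm]; rfl

theorem pvShares_update (y x : List Int) (seen : PySem.Set Int) :
    pvShares y (PySem.Set.update seen x) = (pvShares y seen || pvShares y x) := by
  rw [Bool.eq_iff_iff]
  simp only [pvShares, List.any_eq_true, Bool.or_eq_true,
    List.contains_iff_mem, PySem.Set.mem_update, and_or_left, exists_or]

theorem pvGS_eq (xs : List (List Int)) (seen : PySem.Set Int) :
    pvGS seen xs = pvG (xs.filter (fun y => !pvShares y seen)) := by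
  induction xs generalizing seen with
  | nil => simp [pvGS, pvG.eq_1]
  | cons x xs ih =>
      simp only [pvGS, List.filter_cons, pvIsdisjoint_eq]
      by_cases h : pvShares x seen
      · simp [h, ih]
      · simp only [h, Bool.not_false, if_pos, pvG.eq_2, ih, List.filter_filter]
        congr 2
        apply List.filter_congr
        intro y _
        rw [pvShares_update]
        cases pvShares y seen <;> cases pvShares y x <;> rfl

theorem pvAlt_eq (l : List (List Int)) : remove_short_in_long_alt l = pvG l := by
  rw [remove_short_in_long_alt, pvFoldl_eq, pvGS_eq]
  have hf : l.filter (fun y => !pvShares y (PySem.Set.empty : PySem.Set Int)) = l := by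
    apply List.filter_eq_self.mpr
    intro y _
    have : pvShares y (PySem.Set.empty : PySem.Set Int) = false := by
      rw [pvShares_comm]; rfl
    rw [this]
    rfl
  rw [hf]
  simp

-- ===== VERDICT (by name: the statement is the Claim_ definition above) =====
theorem remove_short_in_long_spec : Claim_equal_remove_short_in_long := by
  intro l _
  unfold Spec_remove_short_in_long
  rw [pvAlt_eq, remove_short_in_long, pvOuterA_eq _ _ _ (by omega)]
  simp
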